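-- pv_equiv track=rewrite | github.com/D-Markov/Colour-Recognition-Neural-Network-Project | src/ColourRecognition.py | flatter_by_colour
-- ===== SOURCE A (Python) =====
-- def flatter_by_colour(images):
--     flattened = []
--     for image in images:
--         image_colours = []
--         for i in range(3):
--             colour = [pixel[i] for row in image for pixel in row]
--             image_colours.extend(colour)
--         flattened.append(image_colours)
--     return flattened
-- ===== SOURCE B (Python) =====
-- def flatter_by_colour(images):
--     flattened = []
--     for image in images:
--         c0, c1, c2 = [], [], []
--         for row in image:
--             for pixel in row:
--                 c0.append(pixel[0])
--                 c1.append(pixel[1])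
--                 c2.append(pixel[2])
--         flattened.append(c0 + c1 + c2)
--     return flattened
-- ===== Notes on version B (the rewrite author's own statement) =====
-- stated objective: alternative
-- what changed: Replaces A's three separate comprehension scans of each image (one per channel) with a single pass over all pixels filling three accumulator lists that are concatenated afterwards.
import Mathlib
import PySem

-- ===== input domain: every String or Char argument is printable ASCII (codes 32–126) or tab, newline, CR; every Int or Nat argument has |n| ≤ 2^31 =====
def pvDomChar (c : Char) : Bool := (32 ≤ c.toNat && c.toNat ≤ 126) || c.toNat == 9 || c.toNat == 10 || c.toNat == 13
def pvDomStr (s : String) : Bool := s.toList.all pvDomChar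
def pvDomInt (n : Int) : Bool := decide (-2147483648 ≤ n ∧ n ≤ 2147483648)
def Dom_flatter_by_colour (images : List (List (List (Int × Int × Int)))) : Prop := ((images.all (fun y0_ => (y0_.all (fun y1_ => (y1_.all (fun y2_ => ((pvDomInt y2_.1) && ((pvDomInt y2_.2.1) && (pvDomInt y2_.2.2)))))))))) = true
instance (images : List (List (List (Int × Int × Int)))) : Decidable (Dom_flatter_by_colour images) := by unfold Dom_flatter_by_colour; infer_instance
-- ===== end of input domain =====

-- B replaces A's three per-channel scans of each image with one pass filling three accumulators, then concatenates; same output, same cost (objective: alternative decomposition).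
-- ===== PORT A =====
-- pixel[i] for i in range(3): tuple indexing on a 3-tuple (always in range here)
def pvChan (p : Int × Int × Int) (i : Nat) : Int :=
  match i with
  | 0 => p.1
  | 1 => p.2.1
  | _ => p.2.2

def flatter_by_colour (images : List (List (List (Int × Int × Int)))) : List (List Int) :=
  images.foldl (fun flattened image =>
    flattened ++ [(List.range 3).foldl (fun image_colours i =>
      image_colours ++ image.flatMap (fun row => row.map (fun pixel => pvChan pixel i))) []]) []

-- ===== PORT B =====
def flatter_by_colour_alt (images : List (List (List (Int × Int × Int)))) : List (List Int) :=
  images.foldl (fun flattened image =>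
    let cs := image.foldl (fun (acc : List Int × List Int × List Int) row =>
      row.foldl (fun a pixel => (a.1 ++ [pixel.1], a.2.1 ++ [pixel.2.1], a.2.2 ++ [pixel.2.2])) acc)
      ([], [], [])
    flattened ++ [cs.1 ++ cs.2.1 ++ cs.2.2]) []

-- ===== PRECONDITION & SPEC =====
def Spec_flatter_by_colour (images : List (List (List (Int × Int × Int)))) (out : List (List Int)) : Prop := out = flatter_by_colour_alt images
instance (images : List (List (List (Int × Int × Int)))) (out : List (List Int)) : Decidable (Spec_flatter_by_colour images out) := by unfold Spec_flatter_by_colour; infer_instance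

-- ===== CLAIM (what is proved, stated in full; the proofs are below) =====
def Claim_equal_flatter_by_colour : Prop := ∀ (images : List (List (List (Int × Int × Int)))), Dom_flatter_by_colour images → Spec_flatter_by_colour images (flatter_by_colour images)

-- ===== LEMMAS AND PROOFS =====

-- ===== VERDICT (by name: the statement is the Claim_ definition above) =====
theorem pvRowFold (row : List (Int × Int × Int)) (a : List Int × List Int × List Int) :
    row.foldl (fun a pixel => (a.1 ++ [pixel.1], a.2.1 ++ [pixel.2.1], a.2.2 ++ [pixel.2.2])) a
      = (a.1 ++ row.map (fun p => p.1), a.2.1 ++ row.map (fun p => p.2.1),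
         a.2.2 ++ row.map (fun p => p.2.2)) := by
  induction row generalizing a with
  | nil => simp
  | cons p r ih => simp [ih, List.append_assoc]

theorem pvImageFold (image : List (List (Int × Int × Int))) (a : List Int × List Int × List Int) :
    image.foldl (fun (acc : List Int × List Int × List Int) row =>
      row.foldl (fun a pixel => (a.1 ++ [pixel.1], a.2.1 ++ [pixel.2.1], a.2.2 ++ [pixel.2.2])) acc) a
      = (a.1 ++ image.flatMap (fun row => row.map (fun p => p.1)),
         a.2.1 ++ image.flatMap (fun row => row.map (fun p => p.2.1)),
         a.2.2 ++ image.flatMap (fun row => row.map (fun p => p.2.2))) := by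
  induction image generalizing a with
  | nil => simp
  | cons r rest ih =>
    rw [List.foldl_cons, pvRowFold, ih]
    simp [List.append_assoc]

theorem pvPerImage (image : List (List (Int × Int × Int))) :
    (List.range 3).foldl (fun image_colours i =>
      image_colours ++ image.flatMap (fun row => row.map (fun pixel => pvChan pixel i))) []
    = (let cs := image.foldl (fun (acc : List Int × List Int × List Int) row =>
        row.foldl (fun a pixel => (a.1 ++ [pixel.1], a.2.1 ++ [pixel.2.1], a.2.2 ++ [pixel.2.2])) acc)
        ([], [], [])
      cs.1 ++ cs.2.1 ++ cs.2.2) := by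
  simp [pvImageFold, List.range_succ, pvChan, List.append_assoc]

theorem pvFoldBoth (images : List (List (List (Int × Int × Int)))) (acc : List (List Int)) :
    images.foldl (fun flattened image =>
      flattened ++ [(List.range 3).foldl (fun image_colours i =>
        image_colours ++ image.flatMap (fun row => row.map (fun pixel => pvChan pixel i))) []]) acc
    = images.foldl (fun flattened image =>
        let cs := image.foldl (fun (acc : List Int × List Int × List Int) row =>
          row.foldl (fun a pixel => (a.1 ++ [pixel.1], a.2.1 ++ [pixel.2.1], a.2.2 ++ [pixel.2.2])) acc)
          ([], [], [])
        flattened ++ [cs.1 ++ cs.2.1 ++ cs.2.2]) acc := by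
  induction images generalizing acc with
  | nil => rfl
  | cons img rest ih =>
    rw [List.foldl_cons, List.foldl_cons, pvPerImage]
    exact ih _

theorem flatter_by_colour_spec : Claim_equal_flatter_by_colour := by
  intro images _
  unfold Spec_flatter_by_colour flatter_by_colour flatter_by_colour_alt
  exact pvFoldBoth images []
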